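-- pv_equiv track=rewrite | github.com/jbragg/research-utils | util.py | last_equal
-- ===== SOURCE A (Python) =====
-- def last_equal(lst):
--     """Return longest sequence of equal elements at the end of a list.
--
--     >>> last_equal([])
--     []
--     >>> last_equal([1, 2, 3, 3, 3])
--     [3, 3, 3]
--     >>> last_equal([1, 2, 3])
--     [3]
--
--     """
--     els = []
--     for v in reversed(lst):
--         if len(els) == 0 or v == els[0]:
--             els.append(v)
--         else:
--             break
--     return els
-- ===== SOURCE B (Python) =====
-- def last_equal(lst):
--     """Return longest sequence of equal elements at the end of a list."""
--     run = []
--     for v in lst: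
--         if run and v == run[-1]:
--             run.append(v)
--         else:
--             run = [v]
--     return run
-- ===== Notes on version B (the rewrite author's own statement) =====
-- stated objective: alternative
-- what changed: B scans the list forward once, maintaining the current maximal run of equal elements and returning the run that is live at the end, instead of A's backward scan over reversed(lst) with an early break.
import Mathlib
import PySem

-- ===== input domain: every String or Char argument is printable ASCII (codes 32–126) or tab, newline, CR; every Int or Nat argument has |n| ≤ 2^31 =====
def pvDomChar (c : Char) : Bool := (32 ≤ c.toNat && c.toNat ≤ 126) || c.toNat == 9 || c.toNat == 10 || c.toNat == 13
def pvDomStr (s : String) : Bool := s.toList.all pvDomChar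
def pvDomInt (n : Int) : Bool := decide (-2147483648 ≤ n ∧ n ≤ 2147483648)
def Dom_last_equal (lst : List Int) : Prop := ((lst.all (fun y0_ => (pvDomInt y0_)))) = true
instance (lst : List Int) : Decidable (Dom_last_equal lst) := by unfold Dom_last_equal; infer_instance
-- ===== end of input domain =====

-- B is an alternative single forward pass keeping the current run; A scans backward and breaks.

-- ===== PORT A =====
-- for v in reversed(lst): if len(els)==0 or v == els[0]: els.append(v) else: break
def lastEqualLoop : List Int → List Int → List Int
  | [], els => els
  | v :: rest, els =>
    match els with
    | [] => lastEqualLoop rest [v]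
    | e :: _ => if v = e then lastEqualLoop rest (els ++ [v]) else els

def last_equal (lst : List Int) : List Int := lastEqualLoop lst.reverse []

-- ===== PORT B =====
-- for v in lst: if run and v == run[-1]: run.append(v) else: run = [v]
def lastEqualAltLoop : List Int → List Int → List Int
  | [], run => run
  | v :: rest, run =>
    if run.getLast? = some v then lastEqualAltLoop rest (run ++ [v])
    else lastEqualAltLoop rest [v]

def last_equal_alt (lst : List Int) : List Int := lastEqualAltLoop lst []

-- ===== PRECONDITION & SPEC =====
def Spec_last_equal (lst : List Int) (out : List Int) : Prop := out = last_equal_alt lst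
instance (lst : List Int) (out : List Int) : Decidable (Spec_last_equal lst out) := by unfold Spec_last_equal; infer_instance

-- ===== CLAIM (what is proved, stated in full; the proofs are below) =====
def Claim_equal_last_equal : Prop := ∀ (lst : List Int), Dom_last_equal lst → Spec_last_equal lst (last_equal lst)

-- ===== LEMMAS AND PROOFS =====

-- canonical value: trailing run expressed on the REVERSED list
def revRun : List Int → List Int
  | [] => []
  | v :: rest => List.replicate ((rest.takeWhile (fun c => c == v)).length + 1) v

theorem loopA_replicate (rest : List Int) (v : Int) (n : Nat) :
    lastEqualLoop rest (List.replicate (n + 1) v)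
      = List.replicate (n + 1 + (rest.takeWhile (fun c => c == v)).length) v := by
  induction rest generalizing n with
  | nil => simp [lastEqualLoop]
  | cons y ys ih =>
    simp only [lastEqualLoop, List.replicate_succ, List.takeWhile]
    by_cases h : y = v
    · subst h
      have h2 : y :: List.replicate n y ++ [y] = List.replicate (n + 1 + 1) y := by
        rw [List.replicate_succ, List.replicate_succ']; simp
      rw [if_pos rfl, h2, ih]
      simp only [beq_self_eq_true]
      congr 1
      simp
      omega
    · have hb : (y == v) = false := by simp [h]
      simp [h, hb, List.replicate_succ]

theorem loopA_eq_revRun (l : List Int) : lastEqualLoop l [] = revRun l := by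
  cases l with
  | nil => rfl
  | cons v rest =>
    show lastEqualLoop rest [v] = _
    have := loopA_replicate rest v 0
    simpa [revRun, Nat.add_comm] using this

theorem takeWhile_all (l : List Int) (v y : Int) (hall : ∀ c ∈ l, c = v) (hy : y ≠ v) :
    (l ++ [y]).takeWhile (fun c => c == v) = l := by
  induction l with
  | nil => simp [hy]
  | cons a as ih =>
    have ha : a = v := hall a (by simp)
    simp only [List.cons_append, List.takeWhile, ha]
    simp [ih (fun c hc => hall c (by simp [hc]))]

theorem takeWhile_notall (l : List Int) (v y : Int) (hall : ¬ ∀ c ∈ l, c = v) :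
    (l ++ [y]).takeWhile (fun c => c == v) = l.takeWhile (fun c => c == v) := by
  induction l with
  | nil => exact absurd (by simp) hall
  | cons a as ih =>
    by_cases ha : a = v
    · have : ¬ ∀ c ∈ as, c = v := fun h => hall (by
        intro c hc; rcases List.mem_cons.mp hc with h1 | h2
        · exact h1 ▸ ha
        · exact h c h2)
      simp only [List.cons_append, List.takeWhile, ha]
      simp [ih this]
    · have hb : (a == v) = false := by simp [ha]
      simp [List.takeWhile, hb]

theorem revRun_append (v : Int) (rest : List Int) (y : Int)
    (h : ¬ ∀ c ∈ v :: rest, c = y) :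
    revRun (v :: rest ++ [y]) = revRun (v :: rest) := by
  by_cases hall : ∀ c ∈ rest, c = v
  · have hy : y ≠ v := by
      intro hyv
      apply h
      intro c hc
      rcases List.mem_cons.mp hc with h1 | h2
      · rw [h1, hyv]
      · rw [hall c h2, hyv]
    have htw : List.takeWhile (fun c => c == v) rest = rest := by
      rw [List.takeWhile_eq_self_iff]
      intro c hc
      simp [hall c hc]
    simp [revRun, takeWhile_all rest v y hall hy, htw]
  · simp [revRun, takeWhile_notall rest v y hall]

theorem revRun_replicate (m : Nat) (x : Int) :
    revRun (List.replicate (m + 1) x) = List.replicate (m + 1) x := by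
  simp [List.replicate_succ, revRun]

theorem revRun_snoc (ys : List Int) (y : Int) (hall : ¬ ∀ c ∈ ys, c = y) :
    revRun (ys.reverse ++ [y]) = revRun ys.reverse := by
  obtain ⟨v, rest, hvr⟩ : ∃ v rest, ys.reverse = v :: rest := by
    cases hys : ys.reverse with
    | nil =>
      exfalso
      apply hall
      intro c hc
      have : c ∈ ys.reverse := List.mem_reverse.mpr hc
      rw [hys] at this
      simp at this
    | cons a b => exact ⟨a, b, rfl⟩
  have hcond : ¬ ∀ c ∈ v :: rest, c = y := by
    rw [← hvr]
    intro hh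
    exact hall fun c hc => hh c (List.mem_reverse.mpr hc)
  rw [hvr, revRun_append v rest y hcond]

theorem cons_eq_replicate (y : Int) (ys : List Int) (hall : ∀ c ∈ ys, c = y) :
    y :: ys = List.replicate (ys.length + 1) y := by
  have : ∀ b ∈ y :: ys, b = y := by
    intro b hb
    rcases List.mem_cons.mp hb with h1 | h2
    · exact h1
    · exact hall b h2
  simpa using List.eq_replicate_of_mem this

theorem loopB_replicate (ys : List Int) (k : Int) (n : Nat) :
    lastEqualAltLoop ys (List.replicate (n + 1) k)
      = if ∀ y ∈ ys, y = k then List.replicate (n + 1) k ++ ys else revRun ys.reverse := by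
  induction ys generalizing k n with
  | nil => simp [lastEqualAltLoop]
  | cons y ys ih =>
    simp only [lastEqualAltLoop, List.getLast?_replicate, Nat.add_one_ne_zero, if_false,
      Option.some.injEq]
    by_cases h : y = k
    · subst h
      rw [if_pos rfl]
      have h2 : List.replicate (n + 1) y ++ [y] = List.replicate (n + 1 + 1) y := by
        rw [← List.replicate_succ']
      rw [h2, ih]
      by_cases hall : ∀ c ∈ ys, c = y
      · have hall' : ∀ c ∈ y :: ys, c = y := by
          intro c hc
          rcases List.mem_cons.mp hc with h1 | h2
          · exact h1
          · exact hall c h2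
        rw [if_pos hall, if_pos hall']
        simp [List.replicate_succ', List.append_assoc]
      · have hall' : ¬ ∀ c ∈ y :: ys, c = y :=
          fun hh => hall fun c hc => hh c (List.mem_cons_of_mem _ hc)
        rw [if_neg hall, if_neg hall', List.reverse_cons, revRun_snoc ys y hall]
    · rw [if_neg fun hk => h hk.symm]
      have hrw : [y] = List.replicate (0 + 1) y := rfl
      rw [hrw, ih y 0]
      have hall' : ¬ ∀ c ∈ y :: ys, c = k := fun hh => h (hh y (by simp))
      rw [if_neg hall']
      by_cases hall : ∀ c ∈ ys, c = y
      · rw [if_pos hall, List.reverse_cons]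
        have hmem : ∀ b ∈ ys.reverse ++ [y], b = y := by
          intro b hb
          rcases List.mem_append.mp hb with h1 | h2
          · exact hall b (List.mem_reverse.mp h1)
          · simpa using h2
        have hlen : (ys.reverse ++ [y]).length = ys.length + 1 := by simp
        rw [List.eq_replicate_of_mem hmem, hlen, revRun_replicate,
          ← cons_eq_replicate y ys hall]
        rfl
      · rw [if_neg hall, List.reverse_cons, revRun_snoc ys y hall]

theorem last_equal_alt_eq_revRun (lst : List Int) :
    last_equal_alt lst = revRun lst.reverse := by
  cases lst with
  | nil => rfl
  | cons x xs =>
    show lastEqualAltLoop xs [x] = _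
    have hrw : [x] = List.replicate (0 + 1) x := rfl
    rw [hrw, loopB_replicate xs x 0, List.reverse_cons]
    by_cases hall : ∀ c ∈ xs, c = x
    · rw [if_pos hall]
      have hmem : ∀ b ∈ xs.reverse ++ [x], b = x := by
        intro b hb
        rcases List.mem_append.mp hb with h1 | h2
        · exact hall b (List.mem_reverse.mp h1)
        · simpa using h2
      have hlen : (xs.reverse ++ [x]).length = xs.length + 1 := by simp
      rw [List.eq_replicate_of_mem hmem, hlen, revRun_replicate,
        ← cons_eq_replicate x xs hall]
      rfl
    · rw [if_neg hall, revRun_snoc xs x hall]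

-- ===== VERDICT (by name: the statement is the Claim_ definition above) =====
theorem last_equal_spec : Claim_equal_last_equal := by
  intro lst _
  show last_equal lst = last_equal_alt lst
  rw [last_equal, loopA_eq_revRun, last_equal_alt_eq_revRun]
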